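-- pv_equiv track=rewrite | github.com/Conan1001/ck3_dynasty_house_modifier | ck3_dynasty_house_modifier.py | seperateTokens
-- ===== SOURCE A (Python) =====
-- def seperateTokens(string, delimiters):
--
--     if len(string) < 1:
--         return
--
--     if not delimiters:
--         yield string
--         return
--
--     tokens = string.split(delimiters[0])
--
--     yield from seperateTokens(tokens[0], delimiters[1:])
--
--     for token in tokens[1:]:
--
--         if delimiters[0]:
--             yield delimiters[0]
--
--         yield from seperateTokens(token, delimiters[1:])
-- ===== SOURCE B (Python) =====
-- def seperateTokens(string, delimiters):
--     # Level-order rewrite: instead of recursing per substring, fold over the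
--     # delimiters once, expanding a flat worklist of tagged items
--     # (is_delimiter_marker, text); markers are inert, empty pieces are dropped
--     # at pop time (so only text A would actually split gets split), pieces
--     # are re-split by the current delimiter.
--     items = [(False, string)]
--     for d in delimiters:
--         nxt = []
--         for tag, s in items:
--             if tag:
--                 nxt.append((True, s))
--             elif s:
--                 for i, p in enumerate(s.split(d)):
--                     if i:
--                         nxt.append((True, d))
--                     nxt.append((False, p))
--         items = nxt
--     for tag, s in items:
--         if tag or s:
--             yield s
-- ===== Notes on version B (the rewrite author's own statement) =====
-- stated objective: alternative
-- what changed: A's depth-first recursive generator (recurse into each split piece with the remaining delimiters) is replaced by a single level-order fold over the delimiters expanding a flat worklist of (is-delimiter-marker, text) items, dropping empty pieces at pop time and filtering empties at the end.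
-- outside the precondition, e.g. on seperateTokens('a', ['a', '']): A returns ['a'], B returns ['a']
import Mathlib
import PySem

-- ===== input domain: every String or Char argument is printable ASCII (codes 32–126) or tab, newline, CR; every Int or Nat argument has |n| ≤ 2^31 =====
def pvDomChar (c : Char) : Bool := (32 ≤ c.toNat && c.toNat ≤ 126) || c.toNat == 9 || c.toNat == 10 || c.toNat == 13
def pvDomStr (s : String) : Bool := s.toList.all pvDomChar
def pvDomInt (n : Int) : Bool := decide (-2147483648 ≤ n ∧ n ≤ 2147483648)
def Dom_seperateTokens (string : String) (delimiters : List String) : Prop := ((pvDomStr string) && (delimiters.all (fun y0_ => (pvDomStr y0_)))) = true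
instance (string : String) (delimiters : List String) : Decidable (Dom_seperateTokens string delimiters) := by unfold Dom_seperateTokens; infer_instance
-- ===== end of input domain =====

-- B replaces A's per-substring depth-first recursion by a single level-order fold over the
-- delimiters expanding a flat tagged worklist (alternative decomposition, same cost).
-- Equivalence is about the returned token LIST (the Python versions are generators, compared fully consumed).

-- ===== PORT A =====
def seperateTokens (string : String) (delimiters : List String) : List String :=
  if PySem.Str.len string < 1 then []
  else
    match delimiters with
    | [] => [string]
    | d :: rest =>
      match PySem.Str.split? string d with
      | none => []        -- string.split('') raises ValueError in Python; excluded by Pre_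
      | some [] => []     -- unreachable: str.split never returns an empty list
      | some (t0 :: ts) =>
        seperateTokens t0 rest ++
          ts.flatMap (fun t =>
            (if d ≠ "" then [d] else []) ++ seperateTokens t rest)

-- ===== PORT B =====
-- one worklist item is (is_delimiter_marker, text); markers are inert, empty pieces are
-- dropped at pop time, nonempty pieces are split by the current delimiter.
def pvStep (d : String) (it : Bool × String) : List (Bool × String) :=
  if it.1 then [it]
  else if it.2 = "" then []
  else
    match PySem.Str.split? it.2 d with
    | none => []          -- s.split('') raises ValueError in Python; excluded by Pre_
    | some [] => []       -- unreachable: str.split never returns an empty list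
    | some (p0 :: ps) => (false, p0) :: ps.flatMap (fun p => [(true, d), (false, p)])

-- the level-order fold over the delimiters, and the final emit pass
def pvRun (ds : List String) (items : List (Bool × String)) : List (Bool × String) :=
  ds.foldl (fun acc d => acc.flatMap (pvStep d)) items

def pvFin (items : List (Bool × String)) : List String :=
  (items.filter (fun it => it.1 || it.2 != "")).map (·.2)

def seperateTokens_alt (string : String) (delimiters : List String) : List String :=
  pvFin (pvRun delimiters [(false, string)])

-- ===== PRECONDITION & SPEC =====
-- Pre_ excludes delimiter lists containing the empty string on a nonempty input, where a
-- reachable str.split('') raises ValueError in BOTH A and B; it over-approximates slightly: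
-- on the rare such inputs where no nonempty text survives down to the empty delimiter,
-- both A and B still return — the same value (see cites).
def Pre_seperateTokens (string : String) (delimiters : List String) : Prop :=
  (∀ d ∈ delimiters, d ≠ "") ∨ string = ""
instance (string : String) (delimiters : List String) : Decidable (Pre_seperateTokens string delimiters) := by unfold Pre_seperateTokens; infer_instance

def pvWitness_seperateTokens : String × List String := ("a,b c,d", [",", " "])

def Spec_seperateTokens (string : String) (delimiters : List String) (out : List String) : Prop := out = seperateTokens_alt string delimiters
instance (string : String) (delimiters : List String) (out : List String) : Decidable (Spec_seperateTokens string delimiters out) := by unfold Spec_seperateTokens; infer_instance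

-- ===== CLAIM (what is proved, stated in full; the proofs are below) =====
def Claim_equal_seperateTokens : Prop := ∀ (string : String) (delimiters : List String), Dom_seperateTokens string delimiters → Pre_seperateTokens string delimiters → Spec_seperateTokens string delimiters (seperateTokens string delimiters)

-- ===== LEMMAS AND PROOFS =====

lemma pvRun_nil (ds : List String) : pvRun ds [] = [] := by
  induction ds with
  | nil => rfl
  | cons d rest ih => simpa [pvRun, List.foldl_cons] using ih

lemma pvRun_append (ds : List String) (l₁ l₂ : List (Bool × String)) :
    pvRun ds (l₁ ++ l₂) = pvRun ds l₁ ++ pvRun ds l₂ := by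
  induction ds generalizing l₁ l₂ with
  | nil => rfl
  | cons d rest ih => simp [pvRun, List.foldl_cons, List.flatMap_append] at ih ⊢; exact ih _ _

lemma pvFin_append (l₁ l₂ : List (Bool × String)) : pvFin (l₁ ++ l₂) = pvFin l₁ ++ pvFin l₂ := by
  simp [pvFin]

lemma pvRun_marker (ds : List String) (m : String) : pvRun ds [(true, m)] = [(true, m)] := by
  induction ds with
  | nil => rfl
  | cons d rest ih => simpa [pvRun, List.foldl_cons, pvStep] using ih

lemma split?_eq_none_iff (s d : String) : PySem.Str.split? s d = none ↔ d = "" := by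
  rw [← String.toList_inj, PySem.Str.split?]
  simp only [PySem.Chars.split?, List.isEmpty_iff]
  split_ifs with h <;> simp [h]

lemma A_empty (ds : List String) : seperateTokens "" ds = [] := by
  rw [seperateTokens.eq_def]
  norm_num [PySem.Str.len]

lemma alt_empty (ds : List String) : seperateTokens_alt "" ds = [] := by
  cases ds with
  | nil => rfl
  | cons d rest =>
    have h1 : pvRun (d :: rest) [(false, "")] = pvRun rest (pvStep d (false, "")) := by
      simp [pvRun, List.foldl_cons]
    have h2 : pvStep d (false, "") = [] := by simp [pvStep]
    rw [seperateTokens_alt, h1, h2, pvRun_nil]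
    rfl

lemma main_lemma (ds : List String) (h : ∀ d ∈ ds, d ≠ "") (s : String) :
    pvFin (pvRun ds [(false, s)]) = seperateTokens s ds := by
  induction ds generalizing s with
  | nil =>
    by_cases hs : s = ""
    · subst hs; simp [pvRun, pvFin, A_empty]
    · rw [seperateTokens]
      simp [pvRun, pvFin, hs]
  | cons d rest ih =>
    have hd : d ≠ "" := h d (by simp)
    have hrest : ∀ x ∈ rest, x ≠ "" := fun x hx => h x (by simp [hx])
    by_cases hs : s = ""
    · subst hs
      have := alt_empty (d :: rest)
      simpa [seperateTokens_alt, A_empty] using this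
    · have hrun : pvRun (d :: rest) [(false, s)] = pvRun rest (pvStep d (false, s)) := by
        simp [pvRun, List.foldl_cons]
      have htail : ∀ ts' : List String,
          pvFin (pvRun rest (ts'.flatMap (fun p => [(true, d), (false, p)]))) =
            ts'.flatMap (fun t => [d] ++ seperateTokens t rest) := by
        intro ts'
        induction ts' with
        | nil => simp [pvRun_nil, pvFin]
        | cons p ps ihp =>
          have hsplit : (p :: ps).flatMap (fun p => [(true, d), (false, p)]) =
              ([(true, d)] ++ [(false, p)]) ++ ps.flatMap (fun p => [(true, d), (false, p)]) := by
            simp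
          rw [hsplit, pvRun_append, pvRun_append, pvFin_append, pvFin_append,
            pvRun_marker, ih hrest p, ihp]
          simp [pvFin]
      rcases htoks : PySem.Str.split? s d with _ | toks
      · exact absurd ((split?_eq_none_iff s d).mp htoks) hd
      rcases toks with _ | ⟨t0, ts⟩
      · -- unreachable in Python; both sides compute []
        have hstep : pvStep d (false, s) = [] := by simp [pvStep, hs, htoks]
        rw [hrun, hstep, pvRun_nil]
        rw [seperateTokens]
        simp [pvFin, hs, htoks]
      · have hstep : pvStep d (false, s) =
            [(false, t0)] ++ ts.flatMap (fun p => [(true, d), (false, p)]) := by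
          simp [pvStep, hs, htoks]
        rw [hrun, hstep, pvRun_append, pvFin_append, ih hrest t0, htail ts]
        conv_rhs => rw [seperateTokens]
        simp [hs, htoks, hd]

-- ===== VERDICT (by name: the statement is the Claim_ definition above) =====
theorem seperateTokens_spec : Claim_equal_seperateTokens := by
  intro s ds _ hpre
  unfold Spec_seperateTokens
  rcases hpre with h | hs
  · exact (main_lemma ds h s).symm
  · subst hs; rw [A_empty, alt_empty]
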